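-- pv_equiv track=rewrite | github.com/Cccmm002/my_leetcode | 306-additive-number/additive-number.py | check
-- ===== SOURCE A (Python) =====
-- def check(snum, first, second):
--     if len(snum) <= 0:
--         return False
--     a = first
--     b = second
--     s = snum
--     while len(s) > 0:
--         c = a + b
--         sc = str(c)
--         lc = len(sc)
--         if lc > len(s):
--             return False
--         if sc != s[:lc]:
--             return False
--         s = s[lc:]
--         a = b
--         b = c
--     return True
-- ===== SOURCE B (Python) =====
-- def check(snum, first, second):
--     if len(snum) <= 0:
--         return False
--     result = ""
--     a, b = first, second
--     while len(result) < len(snum):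
--         c = a + b
--         result += str(c)
--         a, b = b, c
--     return result == snum
-- ===== Notes on version B (the rewrite author's own statement) =====
-- stated objective: alternative
-- what changed: Instead of consuming the suffix of snum term by term with a prefix comparison and slice at every step, B generates the additive sequence into one growing string until it is at least as long as snum and does a single equality test at the end.
import Mathlib
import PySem

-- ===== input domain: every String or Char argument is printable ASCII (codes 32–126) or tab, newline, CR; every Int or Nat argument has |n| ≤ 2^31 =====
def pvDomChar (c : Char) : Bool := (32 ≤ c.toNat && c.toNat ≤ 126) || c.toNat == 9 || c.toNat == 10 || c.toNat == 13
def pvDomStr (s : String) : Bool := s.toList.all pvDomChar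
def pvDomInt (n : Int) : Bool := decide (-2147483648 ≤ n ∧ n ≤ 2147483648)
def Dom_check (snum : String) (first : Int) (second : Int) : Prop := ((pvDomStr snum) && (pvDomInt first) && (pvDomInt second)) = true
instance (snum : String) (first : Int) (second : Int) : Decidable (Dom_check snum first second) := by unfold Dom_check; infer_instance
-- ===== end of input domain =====

-- B replaces A's consume-the-suffix scan (prefix compare + slice per term) by generating the
-- sequence into one growing string and a single final equality; objective: alternative, same cost.
-- Strings are ported as List Char (exact: Python str equality/len/slicing on any str = list ops).

-- str(n) is nonempty, so both loops make progress (used by termination proofs of the ports).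
theorem toChars_ne_nil (n : Int) : PySem.Int.toChars n ≠ [] := by
  unfold PySem.Int.toChars
  split
  · simp
  · have : 0 < (Nat.toDigits 10 n.toNat).length := Nat.length_toDigits_pos
    intro h; simp [h] at this

-- ===== PORT A =====
-- the while-loop of A: s the remaining suffix, a b the last two terms
def checkLoop (s : List Char) (a b : Int) : Bool :=
  if s.length > 0 then
    let c := a + b
    let sc := PySem.Int.toChars c
    let lc := sc.length
    if lc > s.length then false
    else if sc ≠ s.take lc then false
    else checkLoop (s.drop lc) b c
  else true
termination_by s.length
decreasing_by
  have : 0 < (PySem.Int.toChars (a + b)).length := List.length_pos_iff.mpr (toChars_ne_nil (a + b))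
  simp only [List.length_drop]; omega

def check (snum : String) (first : Int) (second : Int) : Bool :=
  if snum.toList.length ≤ 0 then false
  else checkLoop snum.toList first second

-- ===== PORT B =====
-- the while-loop of B: result the accumulated concatenation, grown until ≥ len(target)
def altLoop (target result : List Char) (a b : Int) : List Char :=
  if result.length < target.length then
    let c := a + b
    altLoop target (result ++ PySem.Int.toChars c) b c
  else result
termination_by target.length - result.length
decreasing_by
  have h1 : PySem.Int.toChars (a + b) ≠ [] := toChars_ne_nil (a + b)
  have : 0 < (PySem.Int.toChars (a + b)).length := List.length_pos_iff.mpr h1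
  simp; omega

def check_alt (snum : String) (first : Int) (second : Int) : Bool :=
  if snum.toList.length ≤ 0 then false
  else altLoop snum.toList [] first second == snum.toList

-- ===== PRECONDITION & SPEC =====
def Spec_check (snum : String) (first : Int) (second : Int) (out : Bool) : Prop := out = check_alt snum first second
instance (snum : String) (first : Int) (second : Int) (out : Bool) : Decidable (Spec_check snum first second out) := by unfold Spec_check; infer_instance

-- ===== CLAIM (what is proved, stated in full; the proofs are below) =====
def Claim_equal_check : Prop := ∀ (snum : String) (first : Int) (second : Int), Dom_check snum first second → Spec_check snum first second (check snum first second)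

-- ===== LEMMAS AND PROOFS =====

-- result is always a prefix of altLoop's output
theorem altLoop_prefix (target result : List Char) (a b : Int) :
    result <+: altLoop target result a b := by
  unfold altLoop
  split
  · exact (List.prefix_append result (PySem.Int.toChars (a + b))).trans
      (altLoop_prefix target (result ++ PySem.Int.toChars (a + b)) b (a + b))
  · exact List.prefix_refl _
termination_by target.length - result.length
decreasing_by
  have : 0 < (PySem.Int.toChars (a + b)).length := List.length_pos_iff.mpr (toChars_ne_nil (a + b))
  simp; omega

-- a common prefix factors out of altLoop
theorem altLoop_factor (p t r : List Char) (a b : Int) :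
    altLoop (p ++ t) (p ++ r) a b = p ++ altLoop t r a b := by
  conv_lhs => rw [altLoop]
  conv_rhs => rw [altLoop]
  simp only [List.length_append, List.append_assoc]
  split_ifs with h1 h2 h2
  · exact altLoop_factor p t (r ++ PySem.Int.toChars (a + b)) b (a + b)
  · omega
  · omega
  · rfl
termination_by t.length - r.length
decreasing_by
  have : 0 < (PySem.Int.toChars (a + b)).length := List.length_pos_iff.mpr (toChars_ne_nil (a + b))
  simp; omega

theorem beq_append_left (p x y : List Char) : (p ++ x == p ++ y) = (x == y) := by
  by_cases h : x = y
  · simp [h]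
  · have h2 : p ++ x ≠ p ++ y := fun hc => h (by simpa using hc)
    rw [beq_eq_false_iff_ne.mpr h, beq_eq_false_iff_ne.mpr h2]

-- the two loops agree: A's scan succeeds iff B's generated string equals the remaining suffix
theorem loop_eq (s : List Char) (a b : Int) :
    checkLoop s a b = (altLoop s [] a b == s) := by
  conv_lhs => rw [checkLoop]
  split
  · rename_i hs
    set c := a + b with hc
    set sc := PySem.Int.toChars c with hsc
    have hstep : altLoop s [] a b = altLoop s sc b c := by
      rw [altLoop]; simp only [List.length_nil, List.nil_append]
      rw [if_pos hs]
    by_cases hlen : sc.length > s.length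
    · rw [if_pos hlen]
      have : altLoop s [] a b ≠ s := by
        rw [hstep]; intro he
        have hp := altLoop_prefix s sc b c
        rw [he] at hp
        have := hp.length_le
        omega
      exact (beq_eq_false_iff_ne.mpr this).symm
    · rw [if_neg hlen]
      by_cases hpre : sc = s.take sc.length
      · rw [if_neg (by simpa using hpre)]
        have hsplit : s = sc ++ s.drop sc.length := by
          conv_lhs => rw [← List.take_append_drop sc.length s, ← hpre]
        rw [loop_eq (s.drop sc.length) b c]
        have hfac := altLoop_factor sc (s.drop sc.length) [] b c
        simp only [List.append_nil] at hfac
        rw [← hsplit] at hfac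
        rw [hstep, hfac]
        have hb := beq_append_left sc (altLoop (s.drop sc.length) [] b c) (s.drop sc.length)
        rw [← hsplit] at hb
        exact hb.symm
      · rw [if_pos (by simpa using hpre)]
        have : altLoop s [] a b ≠ s := by
          rw [hstep]; intro he
          have hp := altLoop_prefix s sc b c
          rw [he] at hp
          exact hpre (List.prefix_iff_eq_take.mp hp)
        exact (beq_eq_false_iff_ne.mpr this).symm
  · rename_i hs
    have hnil : s = [] := by
      simp only [gt_iff_lt, not_lt, Nat.le_zero] at hs
      exact List.length_eq_zero_iff.mp hs
    subst hnil
    rw [altLoop]; simp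
termination_by s.length
decreasing_by
  have h0 : 0 < sc.length := hsc ▸ List.length_pos_iff.mpr (toChars_ne_nil c)
  have h2 : (PySem.Int.toChars (a + b)).length = sc.length := by rw [hsc, hc]
  simp only [List.length_drop]
  omega

-- ===== VERDICT (by name: the statement is the Claim_ definition above) =====
theorem check_spec : Claim_equal_check := by
  intro snum first second _
  unfold Spec_check check check_alt
  split
  · rfl
  · exact loop_eq snum.toList first second
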